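-- pv_equiv track=rewrite | github.com/AbeWolthuis/algorithms_for_decision_support | solvers.py | online
-- ===== SOURCE A (Python) =====
-- def online(n_people, m_days, avail_seats, seat_prices, hotel_prices):
--     # Because arrays start at 0
--     last_day = m_days - 1
--
--     fly = [0]*m_days
--     hotel = [0]*m_days
--     total_price = 0
--     remaining = n_people
--     day = 0
--
--     while day < last_day:
--         seats = avail_seats[day]
--         seat_price = seat_prices[day]
--         hotel_price = hotel_prices[day]
--
--         if seat_price <= hotel_price:
--             amount_send_home = min(seats, remaining)
--             fly[day] = amount_send_home
--             remaining -= amount_send_home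
--             total_price += amount_send_home * seat_price
--             total_price += remaining * hotel_price
--
--         else:
--             hotel[day] = remaining
--             total_price += remaining * hotel_price
--
--         day += 1
--
--     seat_price = seat_prices[last_day]
--     total_price += remaining * seat_price
--     fly[last_day] = remaining
--
--     return (fly, hotel), total_price
-- ===== SOURCE B (Python) =====
-- def online(n_people, m_days, avail_seats, seat_prices, hotel_prices):
--     last = m_days - 1
--     # pass 1: greedy decisions only -- flown count per day, remaining carried forward
--     fly = []
--     remaining = n_people
--     for d in range(last):
--         f = min(avail_seats[d], remaining) if seat_prices[d] <= hotel_prices[d] else 0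
--         fly.append(f)
--         remaining -= f
--     fly.append(remaining)  # everyone left must fly on the last day
--     # stayers after each non-final day, as running differences of the flown counts
--     stay = []
--     s = n_people
--     for f in fly[:last]:
--         s -= f
--         stay.append(s)
--     hotel = [stay[d] if hotel_prices[d] < seat_prices[d] else 0 for d in range(last)]
--     hotel.append(0)
--     # pass 2: cost summation -- flight costs (forced last day separate), then hotel costs
--     total = sum(fly[d] * seat_prices[d] for d in range(last)) + remaining * seat_prices[last]
--     total += sum(stay[d] * hotel_prices[d] for d in range(last))
--     return (fly, hotel), total
-- ===== Notes on version B (the rewrite author's own statement) =====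
-- stated objective: alternative
-- what changed: Replaces A's single fused loop (in-place index assignment into preallocated arrays plus interleaved per-day cost accumulation) by a decision pass that only appends flown counts, a derived stayers prefix list, a comprehension building the hotel array, and a separate cost-summation pass over zipped price lists.
import Mathlib
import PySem

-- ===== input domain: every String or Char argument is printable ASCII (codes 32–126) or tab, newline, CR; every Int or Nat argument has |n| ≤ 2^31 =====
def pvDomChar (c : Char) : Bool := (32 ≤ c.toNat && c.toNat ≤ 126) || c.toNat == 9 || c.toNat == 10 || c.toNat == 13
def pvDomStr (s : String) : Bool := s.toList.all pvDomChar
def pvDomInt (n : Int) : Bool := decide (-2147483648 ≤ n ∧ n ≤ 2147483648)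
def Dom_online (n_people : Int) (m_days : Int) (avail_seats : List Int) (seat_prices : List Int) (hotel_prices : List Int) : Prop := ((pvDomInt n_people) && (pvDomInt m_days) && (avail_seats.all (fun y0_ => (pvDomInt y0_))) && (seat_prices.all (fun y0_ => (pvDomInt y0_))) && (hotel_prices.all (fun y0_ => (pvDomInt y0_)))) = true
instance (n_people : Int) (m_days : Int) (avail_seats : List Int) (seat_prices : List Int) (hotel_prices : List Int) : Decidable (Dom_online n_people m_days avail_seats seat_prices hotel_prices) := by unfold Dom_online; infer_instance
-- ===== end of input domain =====

-- B restructures A's fused greedy loop into a decision pass plus derived stayer/hotel lists and a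
-- separate cost-summation pass (objective: alternative decomposition, same O(m) cost); return value only.

-- ===== PORT A =====
-- Body of A's while loop; indexing via pyGetD is exact under Pre_ (day is nonnegative and in range).
def stepA (avail_seats seat_prices hotel_prices : List Int)
    (st : List Int × List Int × Int × Int) (day : Int) : List Int × List Int × Int × Int :=
  let seats := PySem.List.pyGetD avail_seats day 0
  let seat_price := PySem.List.pyGetD seat_prices day 0
  let hotel_price := PySem.List.pyGetD hotel_prices day 0
  if seat_price ≤ hotel_price then
    let a := min seats st.2.2.2
    (st.1.set day.toNat a, st.2.1, st.2.2.1 + a * seat_price + (st.2.2.2 - a) * hotel_price,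
      st.2.2.2 - a)
  else
    (st.1, st.2.1.set day.toNat st.2.2.2, st.2.2.1 + st.2.2.2 * hotel_price, st.2.2.2)

def online (n_people : Int) (m_days : Int) (avail_seats : List Int) (seat_prices : List Int) (hotel_prices : List Int) : (List Int × List Int) × Int :=
  let last_day := m_days - 1
  let st := (PySem.List.pyRange 0 last_day 1).foldl (stepA avail_seats seat_prices hotel_prices)
    (List.replicate m_days.toNat 0, List.replicate m_days.toNat 0, 0, n_people)
  ((st.1.set last_day.toNat st.2.2.2, st.2.1),
    st.2.2.1 + st.2.2.2 * PySem.List.pyGetD seat_prices last_day 0)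

-- ===== PORT B =====
-- Decision pass: append flown count, update remaining.
def stepB (avail_seats seat_prices hotel_prices : List Int)
    (st : List Int × Int) (d : Int) : List Int × Int :=
  let f := if PySem.List.pyGetD seat_prices d 0 ≤ PySem.List.pyGetD hotel_prices d 0 then
             min (PySem.List.pyGetD avail_seats d 0) st.2 else 0
  (st.1 ++ [f], st.2 - f)

-- Stayers pass: running differences of the flown counts.
def stepS (st : List Int × Int) (f : Int) : List Int × Int := (st.1 ++ [st.2 - f], st.2 - f)

def online_alt (n_people : Int) (m_days : Int) (avail_seats : List Int) (seat_prices : List Int) (hotel_prices : List Int) : (List Int × List Int) × Int :=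
  let last := m_days - 1
  let fr := (PySem.List.pyRange 0 last 1).foldl (stepB avail_seats seat_prices hotel_prices)
    ([], n_people)
  let fly := fr.1 ++ [fr.2]
  let stay := ((PySem.List.slice fly none (some last)).foldl stepS ([], n_people)).1
  let hotel := (PySem.List.pyRange 0 last 1).map
    (fun d => if PySem.List.pyGetD hotel_prices d 0 < PySem.List.pyGetD seat_prices d 0 then
                PySem.List.pyGetD stay d 0 else 0) ++ [0]
  let total := ((PySem.List.pyRange 0 last 1).map
      (fun d => PySem.List.pyGetD fly d 0 * PySem.List.pyGetD seat_prices d 0)).sum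
    + fr.2 * PySem.List.pyGetD seat_prices last 0
    + ((PySem.List.pyRange 0 last 1).map
      (fun d => PySem.List.pyGetD stay d 0 * PySem.List.pyGetD hotel_prices d 0)).sum
  ((fly, hotel), total)

-- ===== PRECONDITION & SPEC =====
-- Pre_ excludes exactly the inputs on which A raises IndexError: m_days < 1 (the final
-- fly[last_day] assignment on an empty list) or a seat/price list shorter than the days accessed.
def Pre_online (n_people : Int) (m_days : Int) (avail_seats : List Int) (seat_prices : List Int) (hotel_prices : List Int) : Prop :=
  1 ≤ m_days ∧ m_days - 1 ≤ (avail_seats.length : Int) ∧ m_days ≤ (seat_prices.length : Int) ∧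
    m_days - 1 ≤ (hotel_prices.length : Int)
instance (n_people : Int) (m_days : Int) (avail_seats : List Int) (seat_prices : List Int) (hotel_prices : List Int) : Decidable (Pre_online n_people m_days avail_seats seat_prices hotel_prices) := by unfold Pre_online; infer_instance

def pvWitness_online : Int × Int × List Int × List Int × List Int := (5, 3, [2, 2], [3, 5, 2], [4, 1])

def Spec_online (n_people : Int) (m_days : Int) (avail_seats : List Int) (seat_prices : List Int) (hotel_prices : List Int) (out : (List Int × List Int) × Int) : Prop := out = online_alt n_people m_days avail_seats seat_prices hotel_prices
instance (n_people : Int) (m_days : Int) (avail_seats : List Int) (seat_prices : List Int) (hotel_prices : List Int) (out : (List Int × List Int) × Int) : Decidable (Spec_online n_people m_days avail_seats seat_prices hotel_prices out) := by unfold Spec_online; infer_instance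

-- ===== CLAIM (what is proved, stated in full; the proofs are below) =====
def Claim_equal_online : Prop := ∀ (n_people : Int) (m_days : Int) (avail_seats : List Int) (seat_prices : List Int) (hotel_prices : List Int), Dom_online n_people m_days avail_seats seat_prices hotel_prices → Pre_online n_people m_days avail_seats seat_prices hotel_prices → Spec_online n_people m_days avail_seats seat_prices hotel_prices (online n_people m_days avail_seats seat_prices hotel_prices)

-- ===== LEMMAS AND PROOFS =====

-- Flown count on day k with r people remaining.
def fDec (av sp hp : List Int) (k : Nat) (r : Int) : Int :=
  if sp.getD k 0 ≤ hp.getD k 0 then min (av.getD k 0) r else 0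

-- People remaining after the first n days.
def remD (av sp hp : List Int) (r0 : Int) : Nat → Int
  | 0 => r0
  | n + 1 => remD av sp hp r0 n - fDec av sp hp n (remD av sp hp r0 n)

lemma set_append_len {α : Type} (l1 l2 : List α) (x : α) :
    (l1 ++ l2).set l1.length x = l1 ++ l2.set 0 x := by
  induction l1 with
  | nil => simp
  | cons a t ih => simp [ih]

lemma set_map_range_append {α : Type} (g : Nat → α) (n : Nat) (y x : α) (t : List α) :
    ((List.range n).map g ++ y :: t).set n x = (List.range n).map g ++ x :: t := by
  have h := set_append_len ((List.range n).map g) (y :: t) x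
  simp only [List.length_map, List.length_range, List.set_cons_zero] at h
  exact h

lemma loopA (av sp hp : List Int) (r0 : Int) (M N : Nat) (h : N ≤ M) :
    (PySem.List.pyRange 0 (N : Int) 1).foldl (stepA av sp hp)
      (List.replicate M 0, List.replicate M 0, 0, r0)
    = ((List.range N).map (fun k => fDec av sp hp k (remD av sp hp r0 k)) ++ List.replicate (M - N) 0,
       (List.range N).map (fun k => if sp.getD k 0 ≤ hp.getD k 0 then 0 else remD av sp hp r0 k)
         ++ List.replicate (M - N) 0,
       ((List.range N).map (fun k => fDec av sp hp k (remD av sp hp r0 k) * sp.getD k 0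
          + remD av sp hp r0 (k + 1) * hp.getD k 0)).sum,
       remD av sp hp r0 N) := by
  induction N with
  | zero => simp [PySem.List.pyRange_one_eq_nil, remD]
  | succ n ih =>
    have hcast : ((n + 1 : Nat) : Int) = (n : Int) + 1 := by push_cast; ring
    have hrep : M - n = (M - (n + 1)) + 1 := by omega
    rw [hcast, PySem.List.pyRange_one_succ_right (by positivity), List.foldl_append, ih (by omega)]
    simp only [List.foldl_cons, List.foldl_nil, stepA, PySem.List.pyGetD_natCast,
      Int.toNat_natCast]
    by_cases hle : sp.getD n 0 ≤ hp.getD n 0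
    · have h1 : fDec av sp hp n (remD av sp hp r0 n) = min (av.getD n 0) (remD av sp hp r0 n) := by
        unfold fDec; rw [if_pos hle]
      rw [if_pos hle, hrep, List.replicate_succ, set_map_range_append]
      simp only [Prod.mk.injEq]
      refine ⟨?_, ?_, ?_, ?_⟩
      · rw [List.range_succ, List.map_append, List.map_singleton, List.append_cons]
        congr 2
        rw [h1]
      · rw [List.range_succ, List.map_append, List.map_singleton, List.append_cons]
        congr 2
        rw [if_pos hle]
      · rw [List.range_succ, List.map_append, List.map_singleton, List.sum_append,
          List.sum_singleton,
          show remD av sp hp r0 (n + 1)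
              = remD av sp hp r0 n - fDec av sp hp n (remD av sp hp r0 n) from rfl, h1]
        ring
      · rw [show remD av sp hp r0 (n + 1)
              = remD av sp hp r0 n - fDec av sp hp n (remD av sp hp r0 n) from rfl, h1]
    · have h1 : fDec av sp hp n (remD av sp hp r0 n) = 0 := by unfold fDec; rw [if_neg hle]
      rw [if_neg hle, hrep, List.replicate_succ, set_map_range_append]
      simp only [Prod.mk.injEq]
      refine ⟨?_, ?_, ?_, ?_⟩
      · rw [List.range_succ, List.map_append, List.map_singleton, List.append_cons]
        congr 2
        rw [h1]
      · rw [List.range_succ, List.map_append, List.map_singleton, List.append_cons]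
        congr 2
        rw [if_neg hle]
      · rw [List.range_succ, List.map_append, List.map_singleton, List.sum_append,
          List.sum_singleton,
          show remD av sp hp r0 (n + 1)
              = remD av sp hp r0 n - fDec av sp hp n (remD av sp hp r0 n) from rfl, h1]
        ring
      · rw [show remD av sp hp r0 (n + 1)
              = remD av sp hp r0 n - fDec av sp hp n (remD av sp hp r0 n) from rfl, h1]
        ring

lemma loopB (av sp hp : List Int) (r0 : Int) (N : Nat) :
    (PySem.List.pyRange 0 (N : Int) 1).foldl (stepB av sp hp) ([], r0)
    = ((List.range N).map (fun k => fDec av sp hp k (remD av sp hp r0 k)), remD av sp hp r0 N) := by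
  induction N with
  | zero => simp [PySem.List.pyRange_one_eq_nil, remD]
  | succ n ih =>
    have hcast : ((n + 1 : Nat) : Int) = (n : Int) + 1 := by push_cast; ring
    rw [hcast, PySem.List.pyRange_one_succ_right (by positivity), List.foldl_append, ih]
    simp [stepB, fDec, remD, List.range_succ]

lemma loopS (av sp hp : List Int) (r0 : Int) (N : Nat) :
    ((List.range N).map (fun k => fDec av sp hp k (remD av sp hp r0 k))).foldl stepS ([], r0)
    = ((List.range N).map (fun k => remD av sp hp r0 (k + 1)), remD av sp hp r0 N) := by
  induction N with
  | zero => simp [remD]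
  | succ n ih =>
    rw [List.range_succ, List.map_append, List.foldl_append, ih]
    simp [stepS, remD]

lemma sum_map_pyRange_getD (f g : Nat → Int) (N : Nat) (xs ys : List Int)
    (hf : ∀ k, k < N → PySem.List.pyGetD xs ((k : Nat) : Int) 0 = f k)
    (hg : ∀ k, k < N → PySem.List.pyGetD ys ((k : Nat) : Int) 0 = g k) :
    ((PySem.List.pyRange 0 (N : Int) 1).map
        (fun d => PySem.List.pyGetD xs d 0 * PySem.List.pyGetD ys d 0)).sum
    = ((List.range N).map (fun k => f k * g k)).sum := by
  rw [PySem.List.pyRange_one]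
  simp only [Int.sub_zero, Int.toNat_natCast, List.map_map]
  congr 1
  refine List.map_congr_left ?_
  intro k hk
  have hk' := List.mem_range.mp hk
  simp only [Function.comp_apply, zero_add]
  rw [hf k hk', hg k hk']

theorem online_spec_aux (n_people m_days : Int) (av sp hp : List Int)
    (hpre : Pre_online n_people m_days av sp hp) :
    online n_people m_days av sp hp = online_alt n_people m_days av sp hp := by
  obtain ⟨h1, h2, h3, h4⟩ := hpre
  have hmN : m_days - 1 = (((m_days - 1).toNat : Nat) : Int) := by omega
  set N := (m_days - 1).toNat with hNdef
  have hMt : m_days.toNat = N + 1 := by omega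
  have hav : N ≤ av.length := by omega
  have hsp : N + 1 ≤ sp.length := by omega
  have hhp : N ≤ hp.length := by omega
  unfold online online_alt
  dsimp only []
  rw [hmN, hMt]
  rw [loopA av sp hp n_people (N + 1) N (by omega), loopB av sp hp n_people N]
  dsimp only
  rw [show N + 1 - N = 1 from by omega]
  simp only [List.replicate_one, Int.toNat_natCast]
  rw [set_map_range_append]
  rw [PySem.List.slice_to_natCast]
  rw [show (List.map (fun k => fDec av sp hp k (remD av sp hp n_people k)) (List.range N)
        ++ [remD av sp hp n_people N]).take N
      = List.map (fun k => fDec av sp hp k (remD av sp hp n_people k)) (List.range N) from by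
    simp]
  rw [loopS av sp hp n_people N]
  dsimp only
  simp only [Prod.mk.injEq, PySem.List.pyGetD_natCast]
  refine ⟨⟨trivial, ?_⟩, ?_⟩
  · -- hotel lists
    rw [PySem.List.pyRange_one]
    simp only [Int.sub_zero, Int.toNat_natCast, List.map_map]
    congr 1
    refine List.map_congr_left ?_
    intro k hk
    have hk' : k < N := List.mem_range.mp hk
    simp only [Function.comp_apply, zero_add, PySem.List.pyGetD_natCast]
    rw [PySem.List.getD_map_range]
    · by_cases hle : sp.getD k 0 ≤ hp.getD k 0
      · rw [if_pos hle, if_neg (by omega)]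
      · rw [if_neg hle, if_pos (by omega),
          show remD av sp hp n_people (k + 1)
              = remD av sp hp n_people k - fDec av sp hp k (remD av sp hp n_people k) from rfl,
          show fDec av sp hp k (remD av sp hp n_people k) = 0 from by unfold fDec; rw [if_neg hle]]
        ring
    · exact hk' 
  · -- totals
    rw [sum_map_pyRange_getD (fun k => fDec av sp hp k (remD av sp hp n_people k))
        (fun k => sp.getD k 0) N _ sp
        (fun k hk => by
          rw [PySem.List.pyGetD_natCast, List.getD_append _ _ _ k (by simp [hk])]
          rw [PySem.List.getD_map_range]
          exact hk)
        (fun k _ => by rw [PySem.List.pyGetD_natCast])]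
    rw [sum_map_pyRange_getD (fun k => remD av sp hp n_people (k + 1))
        (fun k => hp.getD k 0) N _ hp
        (fun k hk => by
          rw [PySem.List.pyGetD_natCast]
          rw [PySem.List.getD_map_range]
          exact hk)
        (fun k _ => by rw [PySem.List.pyGetD_natCast])]
    rw [PySem.List.sum_map_add_int]
    ring

-- ===== VERDICT (by name: the statement is the Claim_ definition above) =====
theorem online_spec : Claim_equal_online := by
  intro n m av sp hp _ hpre
  exact online_spec_aux n m av sp hp hpre
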